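-- pv_equiv track=rewrite | github.com/rmluck/CodePath_Intermediate-Technical-Interview-Prep | Problem Sets/problem_set_2.2.py | find_balanced_subsequence
-- ===== SOURCE A (Python) =====
-- def find_balanced_subsequence(art_pieces: list[int]) -> int:
--     """
--     As the curator of an art gallery, you are organizing a new exhibition. You must ensure the collection of art pieces are balanced to attract the right range of buyers. A balanced collection is one where the difference between the maximum and minimum value of the art pieces is exactly 1.
--     Given an integer array art_pieces representing the value of each art piece, write a function find_balanced_subsequence() that returns the length of the longest balanced subsequence.
--     A subsequence is a sequence derived from the array by deleting some or no elements without changing the order of the remaining elements.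
--
--     Parameters:
--         art_pieces (list[int]): integer array representing value of each art piece
--
--     Returns:
--         int: length of longest balanced subsequence
--     """
--
--     art_pieces = sorted(art_pieces)
--
--     count = {}
--     for piece in art_pieces:
--         if piece in count:
--             count[piece] += 1
--         else:
--             count[piece] = 1
--
--     maximum = 0
--     for piece in count.keys():
--         if piece - 1 in count and count[piece] + count[piece - 1] > maximum:
--             maximum = count[piece] + count[piece - 1]
--         if piece + 1 in count and count[piece] + count[piece + 1] > maximum:
--             maximum = count[piece] + count[piece + 1]
--
--     return maximum
-- ===== SOURCE B (Python) =====
-- def find_balanced_subsequence(art_pieces: list[int]) -> int: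
--     # Sort, then one linear scan over runs of equal values, comparing each
--     # run with the previous distinct value's run (no dict, no +-1 lookups).
--     pieces = sorted(art_pieces)
--     if not pieces:
--         return 0
--     best = 0
--     cur = pieces[0]
--     cur_run = 0
--     adj_run = 0  # run length of cur - 1 if it was the previous distinct value, else 0
--     for v in pieces:
--         if v == cur:
--             cur_run += 1
--         else:
--             if adj_run:
--                 best = max(best, adj_run + cur_run)
--             adj_run = cur_run if v == cur + 1 else 0
--             cur = v
--             cur_run = 1
--     if adj_run:
--         best = max(best, adj_run + cur_run)
--     return best
-- ===== Notes on version B (the rewrite author's own statement) =====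
-- stated objective: alternative
-- what changed: Replaces the counting dict and per-key piece-1/piece+1 membership lookups with a single linear scan of the sorted list that tracks the current run of equal values and the previous distinct value's run, flushing a candidate whenever two consecutive distinct values differ by 1.
import Mathlib
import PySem

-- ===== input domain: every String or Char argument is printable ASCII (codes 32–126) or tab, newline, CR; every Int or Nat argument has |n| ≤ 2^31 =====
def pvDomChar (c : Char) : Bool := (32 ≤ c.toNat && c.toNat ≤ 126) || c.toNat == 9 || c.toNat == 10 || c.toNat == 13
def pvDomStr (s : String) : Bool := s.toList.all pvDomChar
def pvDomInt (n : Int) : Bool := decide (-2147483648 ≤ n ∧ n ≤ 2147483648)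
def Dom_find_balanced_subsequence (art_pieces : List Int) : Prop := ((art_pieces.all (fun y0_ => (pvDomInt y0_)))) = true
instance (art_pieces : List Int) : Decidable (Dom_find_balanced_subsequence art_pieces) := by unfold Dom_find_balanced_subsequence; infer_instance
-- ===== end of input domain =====

-- B replaces A's counting dict + per-key (piece±1) lookups by one linear scan of the
-- sorted list over runs of equal values (objective: alternative, same O(n log n) cost).

-- ===== PORT A =====
-- Literal port of A. `count[x]` is ported as `getD … 0`; every such lookup sits behind
-- the same `contains` guard the Python `in` test provides, so it is exact.
def find_balanced_subsequence (art_pieces : List Int) : Int :=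
  let sorted := PySem.List.sorted art_pieces (fun x => x) false
  let count := sorted.foldl (fun (d : PySem.Dict Int Int) piece =>
    match PySem.Dict.get? d piece with
    | some c => PySem.Dict.insert d piece (c + 1)
    | none => PySem.Dict.insert d piece 1) (PySem.Dict.empty : PySem.Dict Int Int)
  (PySem.Dict.keys count).foldl (fun maximum piece =>
    let maximum :=
      if PySem.Dict.contains count (piece - 1) ∧
         PySem.Dict.getD count piece 0 + PySem.Dict.getD count (piece - 1) 0 > maximum
      then PySem.Dict.getD count piece 0 + PySem.Dict.getD count (piece - 1) 0
      else maximum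
    if PySem.Dict.contains count (piece + 1) ∧
       PySem.Dict.getD count piece 0 + PySem.Dict.getD count (piece + 1) 0 > maximum
    then PySem.Dict.getD count piece 0 + PySem.Dict.getD count (piece + 1) 0
    else maximum) 0

-- ===== PORT B =====
-- one loop iteration of Source B: state (best, cur, cur_run, adj_run)
def pvStepB (st : Int × Int × Int × Int) (v : Int) : Int × Int × Int × Int :=
  let (best, cur, curRun, adjRun) := st
  if v = cur then (best, cur, curRun + 1, adjRun)
  else
    let best := if adjRun ≠ 0 then max best (adjRun + curRun) else best
    let adjRun := if v = cur + 1 then curRun else 0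
    (best, v, 1, adjRun)

def find_balanced_subsequence_alt (art_pieces : List Int) : Int :=
  let pieces := PySem.List.sorted art_pieces (fun x => x) false
  match pieces with
  | [] => 0
  | p0 :: _ =>
    match pieces.foldl pvStepB (0, p0, 0, 0) with
    | (best, _, curRun, adjRun) =>
      if adjRun ≠ 0 then max best (adjRun + curRun) else best

-- ===== PRECONDITION & SPEC =====
def Spec_find_balanced_subsequence (art_pieces : List Int) (out : Int) : Prop := out = find_balanced_subsequence_alt art_pieces
instance (art_pieces : List Int) (out : Int) : Decidable (Spec_find_balanced_subsequence art_pieces out) := by unfold Spec_find_balanced_subsequence; infer_instance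

-- ===== CLAIM (what is proved, stated in full; the proofs are below) =====
def Claim_equal_find_balanced_subsequence : Prop := ∀ (art_pieces : List Int), Dom_find_balanced_subsequence art_pieces → Spec_find_balanced_subsequence art_pieces (find_balanced_subsequence art_pieces)

-- ===== LEMMAS AND PROOFS =====

-- run-length decomposition of a list: groups of equal adjacent values, counts as Int
def pvGroups : List Int → List (Int × Int)
  | [] => []
  | v :: t => (v, ((t.takeWhile (· == v)).length : Int) + 1) ::
      pvGroups (t.dropWhile (· == v))
  termination_by s => s.length
  decreasing_by
    exact Nat.lt_succ_of_le (t.length_dropWhile_le _)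

def pvFlatten : List (Int × Int) → List Int
  | [] => []
  | (v, c) :: t => List.replicate c.toNat v ++ pvFlatten t

-- strictly increasing group values, every run nonempty
def pvGood (g : List (Int × Int)) : Prop :=
  (g.map Prod.fst).Pairwise (· < ·) ∧ ∀ p ∈ g, 1 ≤ p.2

-- association-list count lookup
def pvCnt : List (Int × Int) → Int → Int
  | [], _ => 0
  | (v, c) :: t, x => if x = v then c else pvCnt t x

-- contributions of adjacent group pairs whose values differ by exactly 1
def pvContribs : List (Int × Int) → List Int
  | (v, c) :: (w, d) :: t => (if w = v + 1 then [c + d] else []) ++ pvContribs ((w, d) :: t)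
  | _ => []

-- pending backward pair between a previous group and the head of the remaining groups
def pvPendO : Option (Int × Int) → List (Int × Int) → List Int
  | some (w, d), (v, c) :: _ => if w = v - 1 then [c + d] else []
  | _, _ => []

-- A's loop body rewritten over the group list
def pvStepA (g : List (Int × Int)) (m piece : Int) : Int :=
  let m1 := if (piece - 1) ∈ g.map Prod.fst ∧ pvCnt g piece + pvCnt g (piece - 1) > m
            then pvCnt g piece + pvCnt g (piece - 1) else m
  if (piece + 1) ∈ g.map Prod.fst ∧ pvCnt g piece + pvCnt g (piece + 1) > m1
  then pvCnt g piece + pvCnt g (piece + 1) else m1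

-- B's final flush
def pvFinish : Int × Int × Int × Int → Int
  | (best, _, curRun, adjRun) => if adjRun ≠ 0 then max best (adjRun + curRun) else best

theorem pvTake_replicate (v : Int) (t : List Int) :
    t.takeWhile (· == v) = List.replicate (t.takeWhile (· == v)).length v := by
  apply List.eq_replicate_of_mem
  intro b hb
  have := List.mem_takeWhile_imp hb
  simpa using this

theorem pvFlatten_groups (s : List Int) : pvFlatten (pvGroups s) = s := by
  induction s using pvGroups.induct with
  | case1 => rw [pvGroups]; rfl
  | case2 v t ih =>
    rw [pvGroups, pvFlatten, ih]
    have h1 : (((t.takeWhile (· == v)).length : Int) + 1).toNat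
        = (t.takeWhile (· == v)).length + 1 := by omega
    rw [h1, List.replicate_succ, ← pvTake_replicate, List.cons_append,
      List.takeWhile_append_dropWhile]

theorem pvGroups_fst_mem (s : List Int) : ∀ p ∈ pvGroups s, p.1 ∈ s := by
  induction s using pvGroups.induct with
  | case1 => intro p hp; simp [pvGroups] at hp
  | case2 v t ih =>
    intro p hp
    rw [pvGroups] at hp
    rcases List.mem_cons.1 hp with h | h
    · subst h; simp
    · have := ih p h
      have hsub : (t.dropWhile (· == v)).Sublist t := List.dropWhile_sublist _
      exact List.mem_cons_of_mem _ (hsub.mem this)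

theorem pvDrop_lt (v : Int) (t : List Int) (ht : t.Pairwise (· ≤ ·))
    (hv : ∀ y ∈ t, v ≤ y) : ∀ w ∈ t.dropWhile (· == v), v < w := by
  induction t with
  | nil => intro w hw; simp at hw
  | cons a t' ih =>
    by_cases ha : a = v
    · subst ha
      rw [List.dropWhile_cons_of_pos (by simp)]
      exact ih (List.Pairwise.sublist (List.sublist_cons_self _ _) ht)
        (fun y hy => hv y (List.mem_cons_of_mem _ hy))
    · rw [List.dropWhile_cons_of_neg (by simpa using ha)]
      intro w hw
      have hva : v < a := lt_of_le_of_ne (hv a (List.mem_cons_self)) (Ne.symm ha)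
      rcases List.mem_cons.1 hw with h | h
      · omega
      · have : a ≤ w := (List.pairwise_cons.1 ht).1 w h
        omega

theorem pvGroups_good (s : List Int) (hs : s.Pairwise (· ≤ ·)) : pvGood (pvGroups s) := by
  induction s using pvGroups.induct with
  | case1 =>
    constructor
    · rw [pvGroups]; exact List.Pairwise.nil
    · intro p hp; rw [pvGroups] at hp; simp at hp
  | case2 v t ih =>
    have ht : t.Pairwise (· ≤ ·) := (List.pairwise_cons.1 hs).2
    have hvt : ∀ y ∈ t, v ≤ y := (List.pairwise_cons.1 hs).1
    have hdrop : (t.dropWhile (· == v)).Pairwise (· ≤ ·) :=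
      List.Pairwise.sublist (List.dropWhile_sublist _) ht
    obtain ⟨ihp, ihc⟩ := ih hdrop
    constructor
    · rw [pvGroups, List.map_cons, List.pairwise_cons]
      refine ⟨?_, ihp⟩
      intro w hw
      rcases List.mem_map.1 hw with ⟨p, hp, rfl⟩
      exact pvDrop_lt v t ht hvt p.1 (pvGroups_fst_mem _ p hp)
    · intro p hp
      rw [pvGroups] at hp
      rcases List.mem_cons.1 hp with h | h
      · subst h; simp
      · exact ihc p h

theorem pvFlatten_mem {g : List (Int × Int)} {x : Int} (h : x ∈ pvFlatten g) :
    ∃ p ∈ g, p.1 = x := by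
  induction g with
  | nil => simp [pvFlatten] at h
  | cons p t ih =>
    obtain ⟨v, c⟩ := p
    rw [pvFlatten] at h
    rcases List.mem_append.1 h with h | h
    · exact ⟨(v, c), List.mem_cons_self, (List.eq_of_mem_replicate h).symm⟩
    · obtain ⟨q, hq, hqx⟩ := ih h
      exact ⟨q, List.mem_cons_of_mem _ hq, hqx⟩

theorem pvOfList_replicate (v : Int) (n : Nat) (h : n ≠ 0) :
    PySem.Set.ofList (List.replicate n v) = [v] := by
  induction n with
  | zero => omega
  | succ n ih =>
    rw [List.replicate_succ, PySem.Set.ofList_cons]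
    cases n with
    | zero => simp [PySem.Set.ofList_nil, PySem.Set.discard]
    | succ m => rw [ih (by omega)]; simp [PySem.Set.discard]

theorem pvOfList_flatten (g : List (Int × Int)) (hg : pvGood g) :
    PySem.Set.ofList (pvFlatten g) = g.map Prod.fst := by
  induction g with
  | nil => rfl
  | cons p t ih =>
    obtain ⟨v, c⟩ := p
    obtain ⟨hp, hc⟩ := hg
    rw [List.map_cons] at hp
    have hvc : 1 ≤ c := hc (v, c) List.mem_cons_self
    have hih := ih ⟨(List.pairwise_cons.1 hp).2, fun q hq => hc q (List.mem_cons_of_mem _ hq)⟩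
    rw [pvFlatten, PySem.Set.ofList_append, pvOfList_replicate v c.toNat (by omega),
      PySem.Set.update_eq_append_filter, hih]
    have hflt : (t.map Prod.fst).filter (fun y => !(PySem.Set.contains [v] y)) = t.map Prod.fst := by
      apply List.filter_eq_self.2
      intro y hy
      have : v < y := (List.pairwise_cons.1 hp).1 y hy
      simp [PySem.Set.contains_eq_listContains]
      omega
    rw [hflt]
    rfl

theorem pvCnt_flatten (g : List (Int × Int)) (hg : pvGood g) (x : Int) :
    ((pvFlatten g).count x : Int) = pvCnt g x := by
  induction g with
  | nil => simp [pvFlatten, pvCnt]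
  | cons p t ih =>
    obtain ⟨v, c⟩ := p
    obtain ⟨hp, hc⟩ := hg
    rw [List.map_cons] at hp
    have hvc : 1 ≤ c := hc (v, c) List.mem_cons_self
    have hih := ih ⟨(List.pairwise_cons.1 hp).2, fun q hq => hc q (List.mem_cons_of_mem _ hq)⟩
    rw [pvFlatten, pvCnt, List.count_append, List.count_replicate]
    by_cases hx : x = v
    · subst hx
      have hz : (pvFlatten t).count x = 0 := by
        apply List.count_eq_zero.2
        intro hmem
        obtain ⟨q, hq, hqx⟩ := pvFlatten_mem hmem
        have : x < q.1 := (List.pairwise_cons.1 hp).1 q.1 (List.mem_map_of_mem hq)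
        omega
      rw [hz, if_pos (by simp)]
      simp
      omega
    · rw [if_neg (by simpa using fun h : v = x => hx h.symm), if_neg hx]
      simpa using hih

theorem pvCnt_append_not_mem (pre t : List (Int × Int)) (x : Int)
    (h : x ∉ pre.map Prod.fst) : pvCnt (pre ++ t) x = pvCnt t x := by
  induction pre with
  | nil => rfl
  | cons q pre' ih =>
    obtain ⟨v, c⟩ := q
    simp only [List.map_cons, List.mem_cons] at h
    push Not at h
    rw [List.cons_append, pvCnt, if_neg h.1]
    exact ih h.2

-- neighbour characterisation: in a strictly increasing key list, v-1 is a key iff it is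
-- the key of the group immediately before, and v+1 iff the one immediately after
theorem pvMem_pred (pre t : List (Int × Int)) (v c : Int)
    (h : ((pre ++ (v, c) :: t).map Prod.fst).Pairwise (· < ·)) :
    (v - 1) ∈ (pre ++ (v, c) :: t).map Prod.fst ↔
      ∃ p, pre.getLast? = some p ∧ p.1 = v - 1 := by
  induction pre with
  | nil =>
    simp only [List.nil_append, List.map_cons, List.getLast?_nil]
    rw [List.nil_append, List.map_cons, List.pairwise_cons] at h
    constructor
    · intro hm
      rcases List.mem_cons.1 hm with h1 | h1
      · omega
      · have := h.1 _ h1; omega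
    · rintro ⟨p, hp, -⟩; simp at hp
  | cons q pre' ih =>
    rw [List.cons_append, List.map_cons, List.pairwise_cons] at h
    obtain ⟨hq, hrest⟩ := h
    cases pre' with
    | nil =>
      simp only [List.nil_append, List.map_cons] at hrest ⊢
      rw [List.pairwise_cons] at hrest
      constructor
      · intro hm
        rcases List.mem_cons.1 hm with h1 | h1
        · exact ⟨q, rfl, h1.symm⟩
        · rcases List.mem_cons.1 h1 with h2 | h2
          · omega
          · have := hrest.1 _ h2; omega
      · rintro ⟨p, hp, hp1⟩
        simp only [List.getLast?_singleton, Option.some.injEq] at hp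
        subst hp
        simp [← hp1]
    | cons r pre'' =>
      have hlast : (q :: r :: pre'').getLast? = (r :: pre'').getLast? :=
        List.getLast?_cons_cons
      rw [hlast]
      have hr : q.1 < r.1 := hq r.1 (by simp)
      have hrv : r.1 < v := by
        have := List.pairwise_append.1
          (by simpa only [List.map_append, List.map_cons] using hrest)
        exact this.2.2 r.1 (by simp) v (by simp)
      rw [List.cons_append, List.map_cons]
      constructor
      · intro hm
        rcases List.mem_cons.1 hm with h1 | h1
        · omega
        · exact (ih hrest).1 h1
      · intro hp
        exact List.mem_cons_of_mem _ ((ih hrest).2 hp)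

theorem pvMem_succ (pre t : List (Int × Int)) (v c : Int)
    (h : ((pre ++ (v, c) :: t).map Prod.fst).Pairwise (· < ·)) :
    (v + 1) ∈ (pre ++ (v, c) :: t).map Prod.fst ↔
      ∃ p, t.head? = some p ∧ p.1 = v + 1 := by
  rw [List.map_append, List.map_cons] at h ⊢
  have hsplit := List.pairwise_append.1 h
  have hvt := List.pairwise_cons.1 hsplit.2.1
  constructor
  · intro hm
    rcases List.mem_append.1 hm with h1 | h1
    · have := hsplit.2.2 _ h1 v (by simp); omega
    · rcases List.mem_cons.1 h1 with h2 | h2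
      · omega
      · cases t with
        | nil => simp at h2
        | cons p t' =>
          refine ⟨p, rfl, ?_⟩
          rw [List.map_cons] at h2 hvt
          rcases List.mem_cons.1 h2 with h3 | h3
          · omega
          · have h4 : v < p.1 := hvt.1 p.1 (by simp)
            have h5 : p.1 < v + 1 := (List.pairwise_cons.1 hvt.2).1 _ h3
            omega
  · rintro ⟨p, hp, hp1⟩
    cases t with
    | nil => simp at hp
    | cons p' t' =>
      simp only [List.head?_cons, Option.some.injEq] at hp
      subst hp
      apply List.mem_append_right
      simp [hp1]

theorem pvIfMax (P : Prop) [Decidable P] (x m : Int) :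
    (if P ∧ x > m then x else m) = if P then max m x else m := by
  by_cases hP : P
  · simp only [hP, true_and, if_true]
    split_ifs <;> omega
  · simp [hP]

theorem pvFoldlMax_congr (L : List Int) {X Y : Int} (h : X = Y) :
    List.foldl max X L = List.foldl max Y L := by rw [h]

theorem pvCnt_getLast (pre rest : List (Int × Int)) (p : Int × Int)
    (hl : pre.getLast? = some p) (hnd : (pre.map Prod.fst).Pairwise (· < ·)) :
    pvCnt (pre ++ rest) p.1 = p.2 := by
  obtain ⟨pre'', rfl⟩ := List.getLast?_eq_some_iff.1 hl
  rw [List.map_append] at hnd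
  have hnm : p.1 ∉ pre''.map Prod.fst := by
    intro hmem
    have := (List.pairwise_append.1 hnd).2.2 p.1 hmem p.1 (by simp)
    omega
  rw [List.append_assoc, List.singleton_append, pvCnt_append_not_mem _ _ _ hnm,
    pvCnt, if_pos rfl]

theorem pvA_loc (t pre : List (Int × Int)) (m : Int) (hg : pvGood (pre ++ t)) :
    List.foldl (pvStepA (pre ++ t)) m (t.map Prod.fst)
      = List.foldl max m (pvPendO pre.getLast? t ++ pvContribs t) := by
  induction t generalizing pre m with
  | nil => simp [pvPendO, pvContribs]
  | cons hd t2 ih =>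
    obtain ⟨v, c⟩ := hd
    have hp : ((pre ++ (v, c) :: t2).map Prod.fst).Pairwise (· < ·) := hg.1
    have hpmap : (pre.map Prod.fst ++ v :: t2.map Prod.fst).Pairwise (· < ·) := by
      simpa only [List.map_append, List.map_cons] using hp
    have hpre_lt : ∀ a ∈ pre.map Prod.fst, a < v :=
      fun a ha => (List.pairwise_append.1 hpmap).2.2 a ha v (by simp)
    have hcv : pvCnt (pre ++ (v, c) :: t2) v = c := by
      rw [pvCnt_append_not_mem _ _ _ (fun hm => lt_irrefl v (hpre_lt v hm)), pvCnt,
        if_pos rfl]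
    have hmem1 := pvMem_pred pre t2 v c hp
    have hmem2 := pvMem_succ pre t2 v c hp
    have hg' : pvGood ((pre ++ [(v, c)]) ++ t2) := by
      rwa [List.append_assoc, List.singleton_append]
    have hIH := ih (pre ++ [(v, c)]) (pvStepA (pre ++ (v, c) :: t2) m v) hg'
    rw [List.append_assoc, List.singleton_append, List.getLast?_concat] at hIH
    rw [List.map_cons, List.foldl_cons, hIH]
    simp only [pvStepA, hcv, pvIfMax]
    cases t2 with
    | nil =>
      have hm2 : ¬ (v + 1) ∈ (pre ++ (v, c) :: ([] : List (Int × Int))).map Prod.fst := by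
        rw [hmem2]; rintro ⟨p, hp', -⟩; simp at hp'
      rw [if_neg hm2]
      rcases hl : pre.getLast? with _ | ⟨w, d⟩
      · have hm1 : ¬ (v - 1) ∈ (pre ++ (v, c) :: ([] : List (Int × Int))).map Prod.fst := by
          rw [hmem1]; rintro ⟨p, hp', -⟩; rw [hl] at hp'; simp at hp'
        rw [if_neg hm1]
        simp [pvPendO, pvContribs]
      · by_cases hw : w = v - 1
        · have hm1 : (v - 1) ∈ (pre ++ (v, c) :: ([] : List (Int × Int))).map Prod.fst := by
            rw [hmem1]; exact ⟨(w, d), hl, hw⟩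
          have hcd : pvCnt (pre ++ (v, c) :: ([] : List (Int × Int))) (v - 1) = d := by
            have := pvCnt_getLast pre ((v, c) :: []) (w, d) hl
              (List.pairwise_append.1 hpmap).1
            simpa [hw] using this
          rw [if_pos hm1, hcd]
          simp only [pvPendO, pvContribs, List.foldl_append]
          split_ifs <;>
            simp only [List.foldl_cons, List.foldl_nil, List.nil_append,
              List.singleton_append] <;>
            first
              | rfl
              | omega
              | (apply pvFoldlMax_congr; omega)
        · have hm1 : ¬ (v - 1) ∈ (pre ++ (v, c) :: ([] : List (Int × Int))).map Prod.fst := by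
            rw [hmem1]; rintro ⟨p, hp', hp1⟩; rw [hl] at hp'
            obtain rfl : (w, d) = p := by simpa using hp'
            exact hw hp1
          rw [if_neg hm1]
          simp only [pvPendO, pvContribs, List.foldl_append]
          split_ifs <;>
            simp only [List.foldl_cons, List.foldl_nil, List.nil_append,
              List.singleton_append] <;>
            first
              | rfl
              | omega
              | (apply pvFoldlMax_congr; omega)
    | cons q t3 =>
      obtain ⟨w2, d2⟩ := q
      have hforward : ∀ hf : w2 = v + 1,
          pvCnt (pre ++ (v, c) :: (w2, d2) :: t3) (v + 1) = d2 := by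
        intro hf
        rw [pvCnt_append_not_mem _ _ _
          (fun hm => by have := hpre_lt _ hm; omega), pvCnt, if_neg (by omega), pvCnt,
          if_pos hf.symm]
      by_cases hf : w2 = v + 1
      · have hm2 : (v + 1) ∈ (pre ++ (v, c) :: (w2, d2) :: t3).map Prod.fst := by
          rw [hmem2]; exact ⟨(w2, d2), rfl, hf⟩
        rw [if_pos hm2, hforward hf]
        rcases hl : pre.getLast? with _ | ⟨w, d⟩
        · have hm1 : ¬ (v - 1) ∈ (pre ++ (v, c) :: (w2, d2) :: t3).map Prod.fst := by
            rw [hmem1]; rintro ⟨p, hp', -⟩; rw [hl] at hp'; simp at hp'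
          rw [if_neg hm1]
          simp only [pvPendO, pvContribs, List.foldl_append]
          split_ifs <;>
            simp only [List.foldl_cons, List.foldl_nil, List.nil_append,
              List.singleton_append] <;>
            first
              | rfl
              | omega
              | (apply pvFoldlMax_congr; omega)
        · by_cases hw : w = v - 1
          · have hm1 : (v - 1) ∈ (pre ++ (v, c) :: (w2, d2) :: t3).map Prod.fst := by
              rw [hmem1]; exact ⟨(w, d), hl, hw⟩
            have hcd : pvCnt (pre ++ (v, c) :: (w2, d2) :: t3) (v - 1) = d := by
              have := pvCnt_getLast pre ((v, c) :: (w2, d2) :: t3) (w, d) hl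
                (List.pairwise_append.1 hpmap).1
              simpa [hw] using this
            rw [if_pos hm1, hcd]
            simp only [pvPendO, pvContribs, List.foldl_append]
            split_ifs <;>
              simp only [List.foldl_cons, List.foldl_nil, List.nil_append,
                List.singleton_append] <;>
              first
                | rfl
                | omega
                | (apply pvFoldlMax_congr; omega)
          · have hm1 : ¬ (v - 1) ∈ (pre ++ (v, c) :: (w2, d2) :: t3).map Prod.fst := by
              rw [hmem1]; rintro ⟨p, hp', hp1⟩; rw [hl] at hp'
              obtain rfl : (w, d) = p := by simpa using hp'
              exact hw hp1
            rw [if_neg hm1]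
            simp only [pvPendO, pvContribs, List.foldl_append]
            split_ifs <;>
              simp only [List.foldl_cons, List.foldl_nil, List.nil_append,
                List.singleton_append] <;>
              first
                | rfl
                | omega
                | (apply pvFoldlMax_congr; omega)
      · have hm2 : ¬ (v + 1) ∈ (pre ++ (v, c) :: (w2, d2) :: t3).map Prod.fst := by
          rw [hmem2]; rintro ⟨p, hp', hp1⟩
          obtain rfl : (w2, d2) = p := by simpa using hp'
          exact hf hp1
        rw [if_neg hm2]
        rcases hl : pre.getLast? with _ | ⟨w, d⟩
        · have hm1 : ¬ (v - 1) ∈ (pre ++ (v, c) :: (w2, d2) :: t3).map Prod.fst := by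
            rw [hmem1]; rintro ⟨p, hp', -⟩; rw [hl] at hp'; simp at hp'
          rw [if_neg hm1]
          simp only [pvPendO, pvContribs, List.foldl_append]
          split_ifs <;>
            simp only [List.foldl_cons, List.foldl_nil, List.nil_append,
              List.singleton_append] <;>
            first
              | rfl
              | omega
              | (apply pvFoldlMax_congr; omega)
        · by_cases hw : w = v - 1
          · have hm1 : (v - 1) ∈ (pre ++ (v, c) :: (w2, d2) :: t3).map Prod.fst := by
              rw [hmem1]; exact ⟨(w, d), hl, hw⟩
            have hcd : pvCnt (pre ++ (v, c) :: (w2, d2) :: t3) (v - 1) = d := by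
              have := pvCnt_getLast pre ((v, c) :: (w2, d2) :: t3) (w, d) hl
                (List.pairwise_append.1 hpmap).1
              simpa [hw] using this
            rw [if_pos hm1, hcd]
            simp only [pvPendO, pvContribs, List.foldl_append]
            split_ifs <;>
              simp only [List.foldl_cons, List.foldl_nil, List.nil_append,
                List.singleton_append] <;>
              first
                | rfl
                | omega
                | (apply pvFoldlMax_congr; omega)
          · have hm1 : ¬ (v - 1) ∈ (pre ++ (v, c) :: (w2, d2) :: t3).map Prod.fst := by
              rw [hmem1]; rintro ⟨p, hp', hp1⟩; rw [hl] at hp'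
              obtain rfl : (w, d) = p := by simpa using hp'
              exact hw hp1
            rw [if_neg hm1]
            simp only [pvPendO, pvContribs, List.foldl_append]
            split_ifs <;>
              simp only [List.foldl_cons, List.foldl_nil, List.nil_append,
                List.singleton_append] <;>
              first
                | rfl
                | omega
                | (apply pvFoldlMax_congr; omega)

theorem pvB_run (n : Nat) (best cur run adj : Int) :
    List.foldl pvStepB (best, cur, run, adj) (List.replicate n cur)
      = (best, cur, run + (n : Int), adj) := by
  induction n generalizing run with
  | zero => simp
  | succ n ih =>
    rw [List.replicate_succ, List.foldl_cons,
      show pvStepB (best, cur, run, adj) cur = (best, cur, run + 1, adj) from by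
        simp [pvStepB], ih]
    simp only [Prod.mk.injEq, and_true, true_and]
    push_cast; ring

theorem pvB_flat (g : List (Int × Int)) (best cur run adj : Int)
    (hg : ((cur :: g.map Prod.fst)).Pairwise (· < ·)) (hc : ∀ p ∈ g, 1 ≤ p.2)
    (hrun : 1 ≤ run) :
    pvFinish (List.foldl pvStepB (best, cur, run, adj) (pvFlatten g))
      = List.foldl max best
          ((if adj ≠ 0 then [adj + run] else []) ++ pvContribs ((cur, run) :: g)) := by
  induction g generalizing best cur run adj with
  | nil =>
    simp only [pvFlatten, List.foldl_nil, pvFinish, pvContribs, List.append_nil]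
    split_ifs <;> simp
  | cons q t ih =>
    obtain ⟨w, d⟩ := q
    have hcw : cur < w := (List.pairwise_cons.1 hg).1 w (by simp)
    have hd : 1 ≤ d := hc (w, d) List.mem_cons_self
    have hrepl : List.replicate d.toNat w = w :: List.replicate (d.toNat - 1) w := by
      have : d.toNat = (d.toNat - 1) + 1 := by omega
      rw [this, List.replicate_succ]
      simp
    rw [pvFlatten, List.foldl_append, hrepl, List.foldl_cons,
      show pvStepB (best, cur, run, adj) w
          = ((if adj ≠ 0 then max best (adj + run) else best), w, 1,
             (if w = cur + 1 then run else 0)) from by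
        simp [pvStepB]
        exact fun h => absurd h (by omega),
      pvB_run]
    have h1d : (1 : Int) + ((d.toNat - 1 : Nat) : Int) = d := by omega
    rw [h1d]
    have htail : (w :: t.map Prod.fst).Pairwise (· < ·) := (List.pairwise_cons.1 hg).2
    rw [ih _ _ _ _ htail (fun p hp => hc p (List.mem_cons_of_mem _ hp)) hd]
    simp only [pvContribs, List.foldl_append]
    split_ifs <;>
      simp only [List.foldl_cons, List.foldl_nil] <;>
      first
        | rfl
        | omega
        | (apply pvFoldlMax_congr; omega)


theorem pvPendO_none (l : List (Int × Int)) : pvPendO none l = [] := by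
  cases l with
  | nil => rfl
  | cons p t => obtain ⟨v, c⟩ := p; rfl

theorem pvA_eq (art : List Int) :
    find_balanced_subsequence art
      = List.foldl max 0 (pvContribs (pvGroups (PySem.List.sorted art (fun x => x) false))) := by
  have hs : (PySem.List.sorted art (fun x => x) false).Pairwise (· ≤ ·) := by
    simpa using PySem.List.sorted_pairwise art (fun x => x)
  have hgood := pvGroups_good _ hs
  have hflat := pvFlatten_groups (PySem.List.sorted art (fun x => x) false)
  simp only [find_balanced_subsequence]
  have hfun : (fun (d : PySem.Dict Int Int) (piece : Int) =>
      match PySem.Dict.get? d piece with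
      | some c => PySem.Dict.insert d piece (c + 1)
      | none => PySem.Dict.insert d piece 1)
      = fun d x => PySem.Dict.insert d x (PySem.Dict.getD d x 0 + 1) := by
    funext d x
    rcases h : PySem.Dict.get? d x with _ | c <;>
      simp [PySem.Dict.getD_eq_get?_getD, h]
  rw [hfun]
  set s := PySem.List.sorted art (fun x => x) false with hsdef
  set g := pvGroups s with hgdef
  set count := s.foldl (fun d x => PySem.Dict.insert d x (PySem.Dict.getD d x 0 + 1))
    (PySem.Dict.empty : PySem.Dict Int Int) with hcount
  have hget : ∀ x, PySem.Dict.getD count x 0 = pvCnt g x := by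
    intro x
    rw [hcount, PySem.Dict.getD_foldl_insert_add_one, PySem.Dict.getD_empty]
    have := pvCnt_flatten g hgood x
    rw [hflat] at this
    omega
  have hkeys : PySem.Dict.keys count = g.map Prod.fst := by
    rw [hcount, PySem.Dict.keys_foldl_insert, PySem.Dict.keys_empty,
      PySem.Set.update_nil_left, ← hflat]
    exact pvOfList_flatten g hgood
  have hcont : ∀ x, (PySem.Dict.contains count x = true) ↔ x ∈ g.map Prod.fst := by
    intro x; rw [PySem.Dict.contains_iff_mem_keys, hkeys]
  have hstep : (fun (maximum piece : Int) =>
      if PySem.Dict.contains count (piece + 1) = true ∧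
         PySem.Dict.getD count piece 0 + PySem.Dict.getD count (piece + 1) 0 >
           (if PySem.Dict.contains count (piece - 1) = true ∧
               PySem.Dict.getD count piece 0 + PySem.Dict.getD count (piece - 1) 0 > maximum
            then PySem.Dict.getD count piece 0 + PySem.Dict.getD count (piece - 1) 0
            else maximum)
      then PySem.Dict.getD count piece 0 + PySem.Dict.getD count (piece + 1) 0
      else (if PySem.Dict.contains count (piece - 1) = true ∧
               PySem.Dict.getD count piece 0 + PySem.Dict.getD count (piece - 1) 0 > maximum
            then PySem.Dict.getD count piece 0 + PySem.Dict.getD count (piece - 1) 0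
            else maximum)) = pvStepA g := by
    funext m x
    simp only [pvStepA, hget, hcont]
  rw [hkeys, hstep]
  have hloc := pvA_loc g [] 0 (by simpa using hgood)
  simpa [pvPendO_none] using hloc

theorem pvB_eq (art : List Int) :
    find_balanced_subsequence_alt art
      = List.foldl max 0 (pvContribs (pvGroups (PySem.List.sorted art (fun x => x) false))) := by
  have hs : (PySem.List.sorted art (fun x => x) false).Pairwise (· ≤ ·) := by
    simpa using PySem.List.sorted_pairwise art (fun x => x)
  have hgood := pvGroups_good _ hs
  have hflat := pvFlatten_groups (PySem.List.sorted art (fun x => x) false)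
  simp only [find_balanced_subsequence_alt]
  cases hsc : PySem.List.sorted art (fun x => x) false with
  | nil => rw [show pvGroups ([] : List Int) = [] from by rw [pvGroups]]; rfl
  | cons p0 rest =>
    rw [hsc] at hflat hgood
    rw [pvGroups] at hflat hgood ⊢
    set c : Int := ((rest.takeWhile (· == p0)).length : Int) + 1 with hcdef
    set t := pvGroups (rest.dropWhile (· == p0)) with htdef
    have hc1 : 1 ≤ c := by
      have : (0 : Int) ≤ ((rest.takeWhile (· == p0)).length : Int) := by positivity
      omega
    show pvFinish (List.foldl pvStepB (0, p0, 0, 0) (p0 :: rest))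
        = List.foldl max 0 (pvContribs ((p0, c) :: t))
    rw [← hflat, pvFlatten, List.foldl_append]
    have hrun := pvB_run c.toNat 0 p0 0 0
    have hcast : (0 : Int) + (c.toNat : Int) = c := by omega
    rw [hcast] at hrun
    rw [hrun]
    have hbf := pvB_flat t 0 p0 c 0 (by simpa using hgood.1)
      (fun p hp => hgood.2 p (List.mem_cons_of_mem _ hp)) hc1
    simpa using hbf

-- ===== VERDICT (by name: the statement is the Claim_ definition above) =====
theorem find_balanced_subsequence_spec : Claim_equal_find_balanced_subsequence := by
  intro art _
  unfold Spec_find_balanced_subsequence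
  rw [pvA_eq, pvB_eq]
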